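-- pv_equiv track=rewrite | github.com/ukiran75/DataMining | Actions.py | checkAttributes
-- ===== SOURCE A (Python) =====
-- def checkAttributes(listTran,transactions):
--     countZero = 0
--     countOne = 0
--     for i in listTran:
--         if (transactions[i][3] == 0):#Checking the value of the lable is zero for the transation in the list
--             countZero += 1
--         else:#Checking the value of the lable is one for the transation in the list
--             countOne += 1
--     if (countOne == len(listTran)):#Checking if the list is pure with 1's
--        return 1
--     elif (countZero == len(listTran)):#Checking if the list is pure with 0's
--         return 0
--     else:#Retunring 2 if the list is impure
--       return 2
-- ===== SOURCE B (Python) =====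
-- def checkAttributes(listTran, transactions):
--     distinct = {transactions[i][3] for i in listTran}
--     if 0 not in distinct:
--         return 1
--     if len(distinct) == 1:
--         return 0
--     return 2
-- ===== Notes on version B (the rewrite author's own statement) =====
-- stated objective: simpler
-- what changed: Replaces the two running counters compared against len(listTran) by building the deduplicated set of labels once and inspecting it (0 absent -> 1, singleton {0} -> 0, else 2).
import Mathlib
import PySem

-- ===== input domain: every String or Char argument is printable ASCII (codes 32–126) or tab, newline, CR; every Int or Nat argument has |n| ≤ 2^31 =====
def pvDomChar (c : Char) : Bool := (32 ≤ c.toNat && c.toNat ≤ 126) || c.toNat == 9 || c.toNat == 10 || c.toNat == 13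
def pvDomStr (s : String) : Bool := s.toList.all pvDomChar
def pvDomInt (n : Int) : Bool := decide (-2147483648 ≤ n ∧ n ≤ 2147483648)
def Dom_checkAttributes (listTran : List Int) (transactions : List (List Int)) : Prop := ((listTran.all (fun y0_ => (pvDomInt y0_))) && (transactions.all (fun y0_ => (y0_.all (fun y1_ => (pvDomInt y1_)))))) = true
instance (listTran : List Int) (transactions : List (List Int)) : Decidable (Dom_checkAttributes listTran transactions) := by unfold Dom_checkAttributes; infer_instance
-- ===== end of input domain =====

-- B replaces A's two running counters (compared against len(listTran)) by one deduplicated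
-- set of labels that is inspected directly; objective: simpler, same cost.

-- ===== PORT A =====
-- A: count zero / non-zero labels in one loop, then compare each counter with len(listTran).
def checkAttributes (listTran : List Int) (transactions : List (List Int)) : Int :=
  let p := listTran.foldl (fun (c : Int × Int) i =>
      if (PySem.List.pyGet? ((PySem.List.pyGet? transactions i).getD []) 3).getD 0 = 0
      then (c.1 + 1, c.2)
      else (c.1, c.2 + 1)) (0, 0)
  if p.2 = (listTran.length : Int) then 1
  else if p.1 = (listTran.length : Int) then 0
  else 2

-- ===== PORT B =====
-- transactions[i][3]  (total form; Pre_ guarantees both indexings succeed)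
def pvLabel (transactions : List (List Int)) (i : Int) : Int :=
  (PySem.List.pyGet? ((PySem.List.pyGet? transactions i).getD []) 3).getD 0

-- B: the set comprehension {transactions[i][3] for i in listTran}, then inspect it.
def checkAttributes_alt (listTran : List Int) (transactions : List (List Int)) : Int :=
  let distinct : PySem.Set Int := PySem.Set.ofList (listTran.map (pvLabel transactions))
  if !(PySem.Set.contains distinct 0) then 1
  else if distinct.length = 1 then 0
  else 2

-- ===== PRECONDITION & SPEC =====
-- Exactly where Python A returns: every i in listTran is a valid index into transactions
-- and the selected row has an element at index 3 (otherwise A raises IndexError).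
def Pre_checkAttributes (listTran : List Int) (transactions : List (List Int)) : Prop :=
  ∀ i ∈ listTran, PySem.Raise.InRange transactions.length i ∧
    4 ≤ ((PySem.List.pyGet? transactions i).getD []).length
instance (listTran : List Int) (transactions : List (List Int)) : Decidable (Pre_checkAttributes listTran transactions) := by unfold Pre_checkAttributes; infer_instance

def pvWitness_checkAttributes : List Int × List (List Int) := ([0, 1, -1], [[5, 6, 7, 1], [1, 2, 3, 0]])

def Spec_checkAttributes (listTran : List Int) (transactions : List (List Int)) (out : Int) : Prop := out = checkAttributes_alt listTran transactions
instance (listTran : List Int) (transactions : List (List Int)) (out : Int) : Decidable (Spec_checkAttributes listTran transactions out) := by unfold Spec_checkAttributes; infer_instance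

-- ===== CLAIM (what is proved, stated in full; the proofs are below) =====
def Claim_equal_checkAttributes : Prop := ∀ (listTran : List Int) (transactions : List (List Int)), Dom_checkAttributes listTran transactions → Pre_checkAttributes listTran transactions → Spec_checkAttributes listTran transactions (checkAttributes listTran transactions)

-- ===== LEMMAS AND PROOFS =====

-- A's loop computes the two counters as countP over the mapped label list.
theorem pvFoldCounts (f : Int → Int) (xs : List Int) (a b : Int) :
    xs.foldl (fun (c : Int × Int) i => if f i = 0 then (c.1 + 1, c.2) else (c.1, c.2 + 1)) (a, b)
      = (a + ((xs.map f).countP (fun v => v == 0) : Int),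
         b + ((xs.map f).countP (fun v => !(v == 0)) : Int)) := by
  induction xs generalizing a b with
  | nil => simp
  | cons x xs ih =>
    simp only [List.foldl_cons, List.map_cons, List.countP_cons]
    by_cases h : f x = 0 <;> simp [h, ih] <;> omega

-- a nonempty nodup list whose elements are all 0 is [0]
theorem pvNodupAllZero (L : List Int) (hnd : L.Nodup) (hne : L ≠ [])
    (hall : ∀ x ∈ L, x = 0) : L = [0] := by
  match L, hne with
  | [x], _ => simp [hall x (by simp)]
  | x :: y :: t, _ =>
    have hx := hall x (by simp)
    have hy := hall y (by simp)
    simp [hx, hy] at hnd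

theorem pvMain (listTran : List Int) (transactions : List (List Int)) :
    checkAttributes listTran transactions = checkAttributes_alt listTran transactions := by
  unfold checkAttributes checkAttributes_alt
  have hfun : (fun (c : Int × Int) i =>
      if (PySem.List.pyGet? ((PySem.List.pyGet? transactions i).getD []) 3).getD 0 = 0
      then (c.1 + 1, c.2) else (c.1, c.2 + 1))
      = (fun (c : Int × Int) i => if pvLabel transactions i = 0 then (c.1 + 1, c.2) else (c.1, c.2 + 1)) := rfl
  rw [hfun, pvFoldCounts (pvLabel transactions) listTran 0 0]
  set L := listTran.map (pvLabel transactions) with hL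
  have hlen : L.length = listTran.length := by simp [hL]
  have hmem : (0 : Int) ∈ PySem.Set.ofList L ↔ (0 : Int) ∈ L := PySem.Set.mem_ofList L 0
  by_cases hz : (0 : Int) ∈ L
  · -- 0 occurs among the labels: A's first branch is impossible
    have hcont : PySem.Set.contains (PySem.Set.ofList L) 0 = true := by
      simpa [PySem.Set.contains] using hmem.mpr hz
    have hno1 : ¬ ((0 : Int) + (L.countP (fun v => !(v == 0)) : Int) = (listTran.length : Int)) := by
      intro h
      have : L.countP (fun v => !(v == 0)) = L.length := by omega
      have := (List.countP_eq_length).1 this 0 hz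
      simp at this
    rw [if_neg hno1]
    simp only [hcont, Bool.not_true, Bool.false_eq_true, if_false]
    by_cases hall : ∀ x ∈ L, x = 0
    · have hcz : L.countP (fun v => v == 0) = L.length := by
        apply List.countP_eq_length.2
        intro x hx; simp [hall x hx]
      have hset : PySem.Set.ofList L = [0] :=
        pvNodupAllZero _ (PySem.Set.nodup_ofList L)
          (by intro h; rw [h] at hmem; simp at hmem; exact hmem hz)
          (fun x hx => hall x ((PySem.Set.mem_ofList L x).1 hx))
      rw [if_pos (by omega), hset]
      simp
    · have hcz : ¬ ((0 : Int) + (L.countP (fun v => v == 0) : Int) = (listTran.length : Int)) := by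
        intro h
        exact hall (fun x hx => by
          have := (List.countP_eq_length).1 (by omega : L.countP (fun v => v == 0) = L.length) x hx
          simpa using this)
      have hsetlen : (PySem.Set.ofList L).length ≠ 1 := by
        intro h1
        apply hall
        intro x hx
        obtain ⟨y, hy⟩ := List.length_eq_one_iff.1 h1
        have hy0 : y = 0 := by
          have h0 := hmem.mpr hz
          rw [hy] at h0; simp at h0; omega
        have hxS : x ∈ PySem.Set.ofList L := (PySem.Set.mem_ofList L x).2 hx
        rw [hy, hy0] at hxS; simpa using hxS
      rw [if_neg hcz, if_neg hsetlen]
  · -- no zero label: both return 1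
    have hcont : PySem.Set.contains (PySem.Set.ofList L) 0 = false := by
      simp only [PySem.Set.contains]
      simpa using fun h => hz (hmem.mp (by simpa using h))
    have h1 : (0 : Int) + (L.countP (fun v => !(v == 0)) : Int) = (listTran.length : Int) := by
      have : L.countP (fun v => !(v == 0)) = L.length := by
        apply List.countP_eq_length.2
        intro x hx
        simp only [Bool.not_eq_true']
        exact decide_eq_false (fun h => hz (h ▸ hx))
      omega
    rw [if_pos h1]
    simp only [hcont, Bool.not_false, if_true]

-- ===== VERDICT (by name: the statement is the Claim_ definition above) =====
theorem checkAttributes_spec : Claim_equal_checkAttributes := by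
  intro listTran transactions _ _
  unfold Spec_checkAttributes
  exact pvMain listTran transactions
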